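-- pv_equiv track=rewrite | github.com/E3SM-Project/mache | mache/deploy/run.py | _sanitize_script_tag
-- ===== SOURCE A (Python) =====
-- def _sanitize_script_tag(value: str) -> str:
--     """Make a filesystem-safe token for use in script filenames."""
--
--     v = str(value).strip()
--     if not v:
--         return 'unknown'
--
--     out_chars: list[str] = []
--     for ch in v:
--         if ch.isalnum() or ch in ('-', '_', '.'):
--             out_chars.append(ch)
--         else:
--             out_chars.append('_')
--
--     tag = ''.join(out_chars)
--     while '__' in tag:
--         tag = tag.replace('__', '_')
--     return tag.strip('_') or 'unknown'
-- ===== SOURCE B (Python) =====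
-- def _sanitize_script_tag(value: str) -> str:
--     """Make a filesystem-safe token for use in script filenames."""
--     tokens = []
--     current = ''
--     for ch in value:
--         if ch.isalnum() or ch in ('-', '.'):
--             current += ch
--         elif current:
--             tokens.append(current)
--             current = ''
--     if current:
--         tokens.append(current)
--     return '_'.join(tokens) or 'unknown'
-- ===== Notes on version B (the rewrite author's own statement) =====
-- stated objective: simpler
-- what changed: Replaced the per-char map-to-underscore pass, the repeated double-underscore-collapsing replace loop and the final underscore strip by a single pass that collects maximal runs of kept characters as tokens and joins them with an underscore separator.
import Mathlib
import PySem

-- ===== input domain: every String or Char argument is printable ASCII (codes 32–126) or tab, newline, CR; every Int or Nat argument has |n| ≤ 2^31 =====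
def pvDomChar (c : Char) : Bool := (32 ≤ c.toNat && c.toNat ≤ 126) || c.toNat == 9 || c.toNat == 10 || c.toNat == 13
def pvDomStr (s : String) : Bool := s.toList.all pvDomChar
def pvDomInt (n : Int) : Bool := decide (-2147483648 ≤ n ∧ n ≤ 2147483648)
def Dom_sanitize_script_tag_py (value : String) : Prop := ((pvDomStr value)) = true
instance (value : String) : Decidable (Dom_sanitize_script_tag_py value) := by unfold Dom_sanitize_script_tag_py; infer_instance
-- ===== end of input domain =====

-- B replaces A's per-char map-to-underscore pass, the repeated double-underscore-collapsing
-- replace loop and the final underscore strip by one pass collecting maximal runs of kept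
-- characters, joined with an underscore separator (objective: simpler).

-- ===== PORT A =====
def pvKeptA (ch : Char) : Bool :=
  PySem.Chars.isalnum ch || ch == '-' || ch == '_' || ch == '.'

-- termination facts for the 'while "__" in tag' loop: each replace('__','_') strictly shortens
theorem pvGoLen (fuel : Nat) : ∀ (l acc : List Char),
    (PySem.Chars.replace.go ['_','_'] ['_'] fuel l acc).length ≤ acc.length + l.length := by
  induction fuel with
  | zero => intro l acc; simp [PySem.Chars.replace.go]
  | succ fuel ih =>
    intro l acc
    cases l with
    | nil => simp [PySem.Chars.replace.go]
    | cons c t =>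
      simp only [PySem.Chars.replace.go]
      split
      · have h1 := ih (List.drop (['_','_'] : List Char).length (c::t)) (['_'].reverse ++ acc)
        have h2 : (List.drop (['_','_'] : List Char).length (c::t)).length = (c::t).length - 2 :=
          List.length_drop
        simp at h1 h2 ⊢
        omega
      · have h1 := ih t (c::acc)
        simp only [List.length_cons] at h1 ⊢
        omega

theorem pvGoLt (fuel : Nat) : ∀ (l acc : List Char), l.length ≤ fuel →
    ['_','_'] <:+: l →
    (PySem.Chars.replace.go ['_','_'] ['_'] fuel l acc).length < acc.length + l.length := by
  induction fuel with
  | zero =>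
    intro l acc hlen hinf
    rw [Nat.le_zero, List.length_eq_zero_iff] at hlen; subst hlen; simp at hinf
  | succ fuel ih =>
    intro l acc hlen hinf
    cases l with
    | nil => simp at hinf
    | cons c t =>
      simp only [PySem.Chars.replace.go]
      split
      · have h2 : 2 ≤ (c::t).length := by
          rcases hinf with ⟨s₁, s₂, hs⟩
          have := congrArg List.length hs; simp at this; simp; omega
        have h1 := pvGoLen fuel (List.drop (['_','_'] : List Char).length (c::t)) (['_'].reverse ++ acc)
        have h3 : (List.drop (['_','_'] : List Char).length (c::t)).length = (c::t).length - 2 :=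
          List.length_drop
        simp at h1 h2 h3 ⊢
        omega
      · rename_i hpre
        have hinf' : ['_','_'] <:+: t := by
          rcases (List.infix_cons_iff.mp hinf) with h | h
          · exact absurd (List.isPrefixOf_iff_prefix.mpr h) (by simpa using hpre)
          · exact h
        have h1 := ih t (c::acc) (by simp at hlen ⊢; omega) hinf'
        simp only [List.length_cons] at h1 ⊢
        omega

theorem pvReplaceShrink (cs : List Char) (h : ['_','_'] <:+: cs) :
    (PySem.Chars.replace cs ['_','_'] ['_']).length < cs.length := by
  have := pvGoLt cs.length cs [] le_rfl h
  simpa [PySem.Chars.replace] using this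

def pvCollapse (tag : List Char) : List Char :=
  if h : PySem.Chars.isIn ['_','_'] tag then
    pvCollapse (PySem.Chars.replace tag ['_','_'] ['_'])
  else tag
termination_by tag.length
decreasing_by exact pvReplaceShrink tag ((PySem.Chars.isIn_iff_infix _ _).mp h)

def sanitize_script_tag_py (value : String) : String :=
  let v := PySem.Chars.strip value.toList
  if v = [] then "unknown"
  else
    let out_chars := v.foldl (fun acc ch => acc ++ [if pvKeptA ch then ch else '_']) []
    let tag := pvCollapse out_chars
    let r := PySem.Chars.stripChars tag ['_']
    if r = [] then "unknown" else String.ofList r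

-- ===== PORT B =====
def pvKeep (ch : Char) : Bool :=
  PySem.Chars.isalnum ch || ch == '-' || ch == '.'

def pvStep (st : List (List Char) × List Char) (ch : Char) : List (List Char) × List Char :=
  if pvKeep ch then (st.1, st.2 ++ [ch])
  else if st.2 ≠ [] then (st.1 ++ [st.2], [])
  else st

def sanitize_script_tag_py_alt (value : String) : String :=
  let st := value.toList.foldl pvStep ([], [])
  let tokens := if st.2 ≠ [] then st.1 ++ [st.2] else st.1
  let joined := PySem.Chars.join ['_'] tokens
  if joined = [] then "unknown" else String.ofList joined

-- ===== PRECONDITION & SPEC =====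
def Spec_sanitize_script_tag_py (value : String) (out : String) : Prop := out = sanitize_script_tag_py_alt value
instance (value : String) (out : String) : Decidable (Spec_sanitize_script_tag_py value out) := by unfold Spec_sanitize_script_tag_py; infer_instance

-- ===== CLAIM (what is proved, stated in full; the proofs are below) =====
def Claim_equal_sanitize_script_tag_py : Prop := ∀ (value : String), Dom_sanitize_script_tag_py value → Spec_sanitize_script_tag_py value (sanitize_script_tag_py value)

-- ===== LEMMAS AND PROOFS =====

-- maximal runs of characters satisfying p (the tokens)
def pvRuns (p : Char → Bool) : List Char → List (List Char)
  | [] => []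
  | c :: t => if p c then (c :: t.takeWhile p) :: pvRuns p (t.dropWhile p) else pvRuns p t
termination_by cs => cs.length
decreasing_by
  · exact Nat.lt_succ_of_le (List.length_dropWhile_le p t)
  · simp

-- not-underscore predicate (token chars of A's mapped tag)
def pvNu (c : Char) : Bool := !(c == '_')

theorem pvRuns_nil (p : Char → Bool) : pvRuns p [] = [] := by simp [pvRuns]

theorem pvRuns_cons (p : Char → Bool) (c : Char) (t : List Char) :
    pvRuns p (c :: t) =
      if p c then (c :: t.takeWhile p) :: pvRuns p (t.dropWhile p) else pvRuns p t := by
  simp [pvRuns]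

theorem pvRuns_all_sep (p : Char → Bool) (cs : List Char) (h : ∀ c ∈ cs, p c = false) :
    pvRuns p cs = [] := by
  induction cs with
  | nil => simp [pvRuns_nil]
  | cons c t ih =>
    rw [pvRuns_cons, if_neg (by simp [h c (List.mem_cons_self)])]
    exact ih fun d hd => h d (List.mem_cons_of_mem _ hd)

theorem pvTakeWhile_junction (p : Char → Bool) (m : Char) (hm : p m = false) (t y : List Char) :
    List.takeWhile p (t ++ m :: y) = List.takeWhile p t := by
  induction t with
  | nil => simp [List.takeWhile_cons, hm]
  | cons c t ih => by_cases hc : p c <;> simp [List.takeWhile_cons, hc, ih]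

theorem pvDropWhile_junction (p : Char → Bool) (m : Char) (hm : p m = false) (t y : List Char) :
    List.dropWhile p (t ++ m :: y) = List.dropWhile p t ++ m :: y := by
  induction t with
  | nil => simp [List.dropWhile_cons, hm]
  | cons c t ih => by_cases hc : p c <;> simp [List.dropWhile_cons, hc, ih]

theorem pvRuns_append_sep (p : Char → Bool) (m : Char) (hm : p m = false) :
    ∀ (x y : List Char), pvRuns p (x ++ m :: y) = pvRuns p x ++ pvRuns p y := by
  intro x y
  induction x using pvRuns.induct p with
  | case1 => rw [List.nil_append, pvRuns_nil, List.nil_append, pvRuns_cons, if_neg (by simp [hm])]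
  | case2 c t hc ih =>
    rw [List.cons_append, pvRuns_cons, if_pos hc,
      pvTakeWhile_junction p m hm, pvDropWhile_junction p m hm, ih,
      pvRuns_cons, if_pos hc, List.cons_append]
  | case3 c t hc ih =>
    rw [List.cons_append, pvRuns_cons, if_neg hc, ih, pvRuns_cons, if_neg hc]

theorem pvRuns_prepend_all_sep (p : Char → Bool) (a cs : List Char) (h : ∀ c ∈ a, p c = false) :
    pvRuns p (a ++ cs) = pvRuns p cs := by
  induction a with
  | nil => simp
  | cons c t ih =>
    rw [List.cons_append, pvRuns_cons, if_neg (by simp [h c (List.mem_cons_self)])]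
    exact ih fun d hd => h d (List.mem_cons_of_mem _ hd)

theorem pvRuns_append_all_sep (p : Char → Bool) (cs b : List Char) (h : ∀ c ∈ b, p c = false) :
    pvRuns p (cs ++ b) = pvRuns p cs := by
  cases b with
  | nil => simp
  | cons m y =>
    rw [pvRuns_append_sep p m (h m (List.mem_cons_self)) cs y,
      pvRuns_all_sep p y (fun d hd => h d (List.mem_cons_of_mem _ hd)), List.append_nil]

-- the '__' → '_' replacement does not change the runs of non-underscore characters
theorem pvNuUnd : pvNu '_' = false := by decide

theorem pvGoRuns (fuel : Nat) : ∀ (l acc : List Char),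
    pvRuns pvNu (PySem.Chars.replace.go ['_','_'] ['_'] fuel l acc) =
      pvRuns pvNu (acc.reverse ++ l) := by
  induction fuel with
  | zero => intro l acc; simp [PySem.Chars.replace.go]
  | succ fuel ih =>
    intro l acc
    cases l with
    | nil => simp [PySem.Chars.replace.go]
    | cons c t =>
      simp only [PySem.Chars.replace.go]
      split
      · rename_i hpre
        obtain ⟨u, hu⟩ := List.isPrefixOf_iff_prefix.mp hpre
        rw [List.cons_append, List.singleton_append] at hu
        injection hu with h1 h2
        subst h1; subst h2
        have hd : List.drop (['_','_'] : List Char).length ('_'::'_'::u) = u := rfl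
        have hr : (['_'] : List Char).reverse ++ acc = '_'::acc := rfl
        rw [hd, hr, ih u ('_'::acc), List.reverse_cons, List.append_assoc,
          List.singleton_append, pvRuns_append_sep pvNu '_' pvNuUnd,
          pvRuns_append_sep pvNu '_' pvNuUnd, pvRuns_cons, if_neg (by simp [pvNuUnd])]
      · rw [ih t (c :: acc), List.reverse_cons, List.append_assoc, List.singleton_append]

theorem pvReplaceRuns (cs : List Char) :
    pvRuns pvNu (PySem.Chars.replace cs ['_','_'] ['_']) = pvRuns pvNu cs := by
  have := pvGoRuns cs.length cs []
  simpa [PySem.Chars.replace] using this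

theorem pvCollapseSpec (cs : List Char) :
    pvRuns pvNu (pvCollapse cs) = pvRuns pvNu cs ∧
      ¬ (['_','_'] <:+: pvCollapse cs) := by
  induction cs using pvCollapse.induct with
  | case1 tag hin ih =>
    rw [pvCollapse, dif_pos hin]
    exact ⟨ih.1.trans (pvReplaceRuns tag), ih.2⟩
  | case2 tag hin =>
    rw [pvCollapse, dif_neg hin]
    exact ⟨rfl, fun h => hin ((PySem.Chars.isIn_iff_infix _ _).mpr h)⟩

-- stripping underscores from a collapsed tag yields the runs joined by '_'
theorem pvUndNe (c : Char) (h : c ≠ '_') : List.contains ['_'] c = false := by simp [h]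

theorem pvDropWhileAllFalse (p : Char → Bool) (l : List Char) (h : ∀ c ∈ l, p c = false) :
    List.dropWhile p l = l := by
  cases l with
  | nil => simp
  | cons c t => rw [List.dropWhile_cons, if_neg (by simp [h c (List.mem_cons_self)])]

theorem pvDropWhileHead (p : Char → Bool) : ∀ (l x : List Char) (u : Char),
    List.dropWhile p l = u :: x → p u = false := by
  intro l
  induction l with
  | nil => intro x u h; simp at h
  | cons c t ih =>
    intro x u h
    rw [List.dropWhile_cons] at h
    split at h
    · exact ih x u h
    · injection h with h1 _; subst h1; simpa using ‹¬ p c = true›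

theorem pvRstripJoinAux (n : Nat) : ∀ (cs : List Char), cs.length ≤ n →
    ¬ (['_','_'] <:+: cs) → (∀ c, cs.head? = some c → c ≠ '_') →
    (List.dropWhile (fun c => List.contains ['_'] c) cs.reverse).reverse =
      PySem.Chars.join ['_'] (pvRuns pvNu cs) := by
  induction n with
  | zero =>
    intro cs hlen _ _
    rw [Nat.le_zero, List.length_eq_zero_iff] at hlen; subst hlen
    simp [pvRuns_nil, PySem.Chars.join_nil]
  | succ n ih =>
    intro cs hlen hinf hhead
    cases cs with
    | nil => simp [pvRuns_nil, PySem.Chars.join_nil]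
    | cons c t =>
      have hc : c ≠ '_' := hhead c rfl
      have hcnu : pvNu c = true := by simp [pvNu, hc]
      have hta : List.takeWhile pvNu t ++ List.dropWhile pvNu t = t :=
        List.takeWhile_append_dropWhile
      have hanu : ∀ d ∈ List.takeWhile pvNu t, d ≠ '_' := by
        intro d hd h
        have := List.mem_takeWhile_imp hd
        simp [pvNu, h] at this
      rw [pvRuns_cons, if_pos hcnu]
      cases hr : List.dropWhile pvNu t with
      | nil =>
        have hta' : List.takeWhile pvNu t = t := by
          conv_rhs => rw [← hta, hr, List.append_nil]
        have hall : ∀ d ∈ (c::t).reverse, (fun c => List.contains ['_'] c) d = false := by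
          intro d hd
          rw [List.mem_reverse] at hd
          rcases List.mem_cons.mp hd with rfl | hd'
          · exact pvUndNe d hc
          · exact pvUndNe d (hanu d (by rw [hta']; exact hd'))
        rw [pvRuns_nil, PySem.Chars.join_singleton,
          pvDropWhileAllFalse _ _ hall, List.reverse_reverse, hta']
      | cons u r0 =>
        have hu : u = '_' := by
          have := pvDropWhileHead pvNu t r0 u hr
          simpa [pvNu] using this
        subst hu
        cases r0 with
        | nil =>
          have hcs : c :: t = (c :: List.takeWhile pvNu t) ++ ['_'] := by
            conv_lhs => rw [← hta, hr]
            simp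
          rw [hcs, List.reverse_append, List.reverse_singleton, List.singleton_append,
            List.dropWhile_cons, if_pos (by simp)]
          have hall : ∀ d ∈ (c :: List.takeWhile pvNu t).reverse,
              (fun c => List.contains ['_'] c) d = false := by
            intro d hd
            rw [List.mem_reverse] at hd
            rcases List.mem_cons.mp hd with rfl | hd'
            · exact pvUndNe d hc
            · exact pvUndNe d (hanu d hd')
          rw [pvDropWhileAllFalse _ _ hall, List.reverse_reverse, pvRuns_cons,
            if_neg (by simp [pvNu]), pvRuns_nil, PySem.Chars.join_singleton]
        | cons e r' =>
          have hrsuf : ('_'::e::r') <:+ t := hr ▸ List.dropWhile_suffix pvNu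
          have he : e ≠ '_' := by
            intro h; subst h
            exact hinf (List.IsInfix.trans ⟨[], r', by simp⟩
              (hrsuf.isInfix.trans (List.suffix_cons c t).isInfix))
          have hysuf : (e::r') <:+ (c::t) :=
            ((List.suffix_cons '_' (e::r')).trans hrsuf).trans (List.suffix_cons c t)
          have hynf : ¬ (['_','_'] <:+: (e::r')) := fun h => hinf (h.trans hysuf.isInfix)
          have hlen' : (e::r').length ≤ n := by
            have h1 := hrsuf.length_le
            simp at h1 hlen ⊢
            omega
          have ihy := ih (e::r') hlen' hynf
            (fun d hd => by simp at hd; subst hd; exact he)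
          have hcs : c :: t = ((c :: List.takeWhile pvNu t) ++ ['_']) ++ (e::r') := by
            conv_lhs => rw [← hta, hr]
            simp
          have hne : List.dropWhile (fun c => List.contains ['_'] c) (e::r').reverse ≠ [] := by
            intro h0
            rw [List.dropWhile_eq_nil_iff] at h0
            exact absurd (h0 e (by simp)) (by simp [he])
          have hund : ¬ (pvNu '_' = true) := by simp [pvNuUnd]
          have hemp : ¬ ((List.dropWhile (fun c => List.contains ['_'] c) (e::r').reverse).isEmpty = true) := by
            simpa [List.isEmpty_iff] using hne
          have henu : pvNu e = true := by simp [pvNu, he]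
          conv_rhs => rw [pvRuns_cons, if_neg hund]
          rw [hcs, List.reverse_append, List.dropWhile_append, if_neg hemp,
            List.reverse_append, List.reverse_reverse, ihy]
          have hrunsy : pvRuns pvNu (e::r') =
              (e :: List.takeWhile pvNu r') :: pvRuns pvNu (List.dropWhile pvNu r') := by
            rw [pvRuns_cons, if_pos henu]
          rw [hrunsy, PySem.Chars.join_cons_cons, ← hrunsy]

theorem pvRstripJoin (cs : List Char) (hinf : ¬ (['_','_'] <:+: cs))
    (hhead : ∀ c, cs.head? = some c → c ≠ '_') :
    (List.dropWhile (fun c => List.contains ['_'] c) cs.reverse).reverse =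
      PySem.Chars.join ['_'] (pvRuns pvNu cs) :=
  pvRstripJoinAux cs.length cs le_rfl hinf hhead

theorem pvStripCharsJoin (cs : List Char) (hinf : ¬ (['_','_'] <:+: cs)) :
    PySem.Chars.stripChars cs ['_'] = PySem.Chars.join ['_'] (pvRuns pvNu cs) := by
  simp only [PySem.Chars.stripChars]
  cases cs with
  | nil => simp [pvRuns_nil, PySem.Chars.join_nil]
  | cons c t =>
    by_cases hc : c = '_'
    · subst hc
      have hth : ∀ d, t.head? = some d → d ≠ '_' := by
        intro d hd h
        subst h
        cases t with
        | nil => simp at hd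
        | cons d' t' =>
          simp at hd; subst hd
          exact hinf ⟨[], t', by simp⟩
      have hdt : List.dropWhile (fun c => List.contains ['_'] c) t = t := by
        cases ht : t with
        | nil => simp
        | cons d t' =>
          have hd' : d ≠ '_' := hth d (by simp [ht])
          rw [List.dropWhile_cons, if_neg (by simp [hd'])]
      rw [List.dropWhile_cons, if_pos (by simp), hdt, pvRuns_cons,
        if_neg (by simp [pvNuUnd])]
      exact pvRstripJoin t (fun h => hinf (h.trans (List.suffix_cons '_' t).isInfix)) hth
    · rw [List.dropWhile_cons, if_neg (by simp [hc])]
      exact pvRstripJoin (c::t) hinf (fun d hd => by simp at hd; subst hd; exact hc)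

-- mapping non-kept chars to '_' turns pvKeep-runs into pvNu-runs
theorem pvKeepNe (d : Char) (h : pvKeep d = true) : d ≠ '_' := by
  intro he; subst he; exact absurd h (by decide)

theorem pvNuF (d : Char) : pvNu (if pvKeptA d then d else '_') = pvKeep d := by
  by_cases hk : pvKeptA d = true
  · rw [if_pos hk]
    by_cases hu : d = '_'
    · subst hu; decide
    · have h1 : pvNu d = true := by simp [pvNu, hu]
      rw [h1]
      simp [pvKeptA, pvKeep] at hk ⊢
      tauto
  · rw [if_neg hk]
    have h2 : pvKeep d = false := by
      simp [pvKeptA, pvKeep] at hk ⊢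
      tauto
    rw [h2]; exact pvNuUnd

theorem pvFid (d : Char) (h : pvKeep d = true) : (if pvKeptA d then d else '_') = d := by
  have hk : pvKeptA d = true := by
    simp [pvKeptA, pvKeep] at h ⊢
    tauto
  rw [if_pos hk]

theorem pvRunsMap (cs : List Char) :
    pvRuns pvNu (cs.map (fun ch => if pvKeptA ch then ch else '_')) = pvRuns pvKeep cs := by
  induction cs using pvRuns.induct pvKeep with
  | case1 => simp [pvRuns_nil]
  | case2 c t hc ih =>
    have hfc : (if pvKeptA c then c else '_') = c := pvFid c hc
    have hnuc : pvNu c = true := by simp [pvNu, pvKeepNe c hc]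
    have hco : (pvNu ∘ (fun ch => if pvKeptA ch then ch else '_')) = pvKeep := funext pvNuF
    rw [List.map_cons, hfc, pvRuns_cons, if_pos hnuc, pvRuns_cons, if_pos hc]
    congr 1
    · rw [List.takeWhile_map, hco]
      congr 1
      exact (List.map_congr_left fun d hd =>
        pvFid d (List.mem_takeWhile_imp hd)).trans (List.map_id _)
    · rw [List.dropWhile_map, hco]
      exact ih
  | case3 c t hc ih =>
    have hcf : pvKeep c = false := by simpa using hc
    have hnf : pvNu (if pvKeptA c then c else '_') = false := (pvNuF c).trans hcf
    rw [List.map_cons, pvRuns_cons, if_neg (by simp [hnf]), pvRuns_cons, if_neg hc]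
    exact ih

-- whitespace characters in the domain are separators
theorem pvSpaceSep (c : Char) (hd : pvDomChar c = true) (hs : PySem.Chars.isspace c = true) :
    pvKeep c = false := by
  simp [pvDomChar] at hd
  simp [PySem.Chars.isspace] at hs
  have h4 : c.toNat = 9 ∨ c.toNat = 10 ∨ c.toNat = 13 ∨ c.toNat = 32 := by omega
  have hm : c ≠ '-' := by intro h; subst h; simp [Char.toNat] at h4
  have hp : c ≠ '.' := by intro h; subst h; simp [Char.toNat] at h4
  simp [pvKeep, PySem.Chars.isalnum, PySem.Chars.isalpha, PySem.Chars.isdigit,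
    PySem.Chars.isupper, PySem.Chars.islower, hm, hp, Char.le_def,
    UInt32.le_iff_toNat_le]
  rw [show c.toNat = c.val.toNat from rfl] at h4
  omega

theorem pvRunsStrip (l : List Char) (hd : ∀ c ∈ l, pvDomChar c = true) :
    pvRuns pvKeep (PySem.Chars.strip l) = pvRuns pvKeep l := by
  have hsep : ∀ c ∈ l, PySem.Chars.isspace c = true → pvKeep c = false :=
    fun c hc hs => pvSpaceSep c (hd c hc) hs
  rw [PySem.Chars.strip]
  have hl : pvRuns pvKeep (PySem.Chars.lstrip l) = pvRuns pvKeep l := by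
    rw [PySem.Chars.lstrip]
    conv_rhs => rw [← List.takeWhile_append_dropWhile (p := PySem.Chars.isspace) (l := l)]
    rw [pvRuns_prepend_all_sep]
    intro c hc
    exact hsep c (List.takeWhile_subset _ hc) (List.mem_takeWhile_imp hc)
  rw [← hl, PySem.Chars.rstrip]
  have hsub : PySem.Chars.lstrip l ⊆ l := by
    rw [PySem.Chars.lstrip]
    exact List.dropWhile_subset _
  have hx : PySem.Chars.lstrip l =
      (List.dropWhile PySem.Chars.isspace (PySem.Chars.lstrip l).reverse).reverse ++
        (List.takeWhile PySem.Chars.isspace (PySem.Chars.lstrip l).reverse).reverse := by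
    conv_lhs => rw [← List.reverse_reverse (PySem.Chars.lstrip l),
      ← List.takeWhile_append_dropWhile (p := PySem.Chars.isspace)
        (l := (PySem.Chars.lstrip l).reverse)]
    rw [List.reverse_append]
  conv_rhs => rw [hx]
  rw [pvRuns_append_all_sep]
  intro c hc
  rw [List.mem_reverse] at hc
  have hs : PySem.Chars.isspace c = true := List.mem_takeWhile_imp hc
  have hcl : c ∈ l := hsub (List.mem_reverse.mp (List.takeWhile_subset _ hc))
  exact hsep c hcl hs

-- B's fold computes the runs
theorem pvFoldSpec : ∀ (cs : List Char) (acc : List (List Char)) (cur : List Char),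
    (let st := cs.foldl pvStep (acc, cur);
     if st.2 ≠ [] then st.1 ++ [st.2] else st.1) =
      if cur = [] then acc ++ pvRuns pvKeep cs
      else acc ++ ((cur ++ cs.takeWhile pvKeep) :: pvRuns pvKeep (cs.dropWhile pvKeep)) := by
  intro cs
  induction cs with
  | nil =>
    intro acc cur
    by_cases hcur : cur = [] <;> simp [hcur, pvRuns_nil]
  | cons c t ih =>
    intro acc cur
    rw [List.foldl_cons]
    by_cases hk : pvKeep c = true
    · have hstep : pvStep (acc, cur) c = (acc, cur ++ [c]) := by simp [pvStep, hk]
      rw [hstep, ih]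
      rw [if_neg (by simp)]
      by_cases hcur : cur = []
      · subst hcur
        rw [if_pos rfl, pvRuns_cons, if_pos hk]
        simp [List.takeWhile_cons, List.dropWhile_cons, hk]
      · rw [if_neg hcur]
        simp [List.takeWhile_cons, List.dropWhile_cons, hk]
    · by_cases hcur : cur = []
      · subst hcur
        have hstep : pvStep (acc, []) c = (acc, []) := by simp [pvStep, hk]
        rw [hstep, ih, if_pos rfl, if_pos rfl, pvRuns_cons, if_neg hk]
      · have hstep : pvStep (acc, cur) c = (acc ++ [cur], []) := by simp [pvStep, hk, hcur]
        rw [hstep, ih, if_pos rfl, if_neg hcur]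
        simp [List.takeWhile_cons, List.dropWhile_cons, hk, pvRuns_cons]

-- ===== VERDICT (by name: the statement is the Claim_ definition above) =====
theorem sanitize_script_tag_py_spec : Claim_equal_sanitize_script_tag_py := by
  intro value hdom
  unfold Spec_sanitize_script_tag_py
  have hdoml : ∀ c ∈ value.toList, pvDomChar c = true := by
    simpa [Dom_sanitize_script_tag_py, pvDomStr, List.all_eq_true] using hdom
  have hB : sanitize_script_tag_py_alt value =
      (if PySem.Chars.join ['_'] (pvRuns pvKeep value.toList) = [] then "unknown"
       else String.ofList (PySem.Chars.join ['_'] (pvRuns pvKeep value.toList))) := by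
    simp only [sanitize_script_tag_py_alt]
    rw [show (if (value.toList.foldl pvStep ([], [])).2 ≠ [] then
          (value.toList.foldl pvStep ([], [])).1 ++ [(value.toList.foldl pvStep ([], [])).2]
        else (value.toList.foldl pvStep ([], [])).1) = pvRuns pvKeep value.toList from by
      simpa using pvFoldSpec value.toList [] []]
  simp only [sanitize_script_tag_py]
  by_cases hv : PySem.Chars.strip value.toList = []
  · rw [if_pos hv, hB]
    have hallws : ∀ c ∈ value.toList, PySem.Chars.isspace c = true := by
      have h1 : List.dropWhile PySem.Chars.isspace
          (PySem.Chars.lstrip value.toList).reverse = [] := by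
        have := hv
        rw [PySem.Chars.strip, PySem.Chars.rstrip, List.reverse_eq_nil_iff] at this
        exact this
      rw [List.dropWhile_eq_nil_iff] at h1
      intro c hc
      conv at hc => rw [← List.takeWhile_append_dropWhile
        (p := PySem.Chars.isspace) (l := value.toList)]
      rcases List.mem_append.mp hc with h | h
      · exact List.mem_takeWhile_imp h
      · exact h1 c (by rw [List.mem_reverse]; exact h)
    have hruns : pvRuns pvKeep value.toList = [] :=
      pvRuns_all_sep _ _ (fun c hc => pvSpaceSep c (hdoml c hc) (hallws c hc))
    rw [hruns, PySem.Chars.join_nil, if_pos rfl]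
  · rw [if_neg hv]
    have hmap : (PySem.Chars.strip value.toList).foldl
        (fun acc ch => acc ++ [if pvKeptA ch then ch else '_']) [] =
        (PySem.Chars.strip value.toList).map (fun ch => if pvKeptA ch then ch else '_') := by
      simpa using PySem.List.foldl_append_singleton_eq_map
        (fun ch => if pvKeptA ch then ch else '_') (PySem.Chars.strip value.toList) []
    obtain ⟨hts, hinf⟩ := pvCollapseSpec
      ((PySem.Chars.strip value.toList).map (fun ch => if pvKeptA ch then ch else '_'))
    rw [hmap, pvStripCharsJoin _ hinf, hts, pvRunsMap, pvRunsStrip _ hdoml, hB]
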